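-- pv_equiv track=rewrite | github.com/COMP2913-24-25/Pendolare | scripts/parse-unittests.py | replace_section_by_header
-- ===== SOURCE A (Python) =====
-- def replace_section_by_header(content: str, service: str, table_md: str) -> str:
--     heading = f"### Pendo.{service}"
--     lines = content.splitlines()
--     out = []
--     i = 0
--     while i < len(lines):
--         if lines[i].strip() == heading:
--             out.append(lines[i])
--             out.extend(table_md.splitlines())
--             out.append("")
--             i += 1
--
--             while i < len(lines) and not lines[i].startswith("### "):
--                 i += 1
--         else:
--             out.append(lines[i])
--             i += 1
--     return "\n".join(out).rstrip() + "\n"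
-- ===== SOURCE B (Python) =====
-- def replace_section_by_header(content: str, service: str, table_md: str) -> str:
--     heading = f"### Pendo.{service}"
--
--     def blocks(lines):
--         res = []
--         while lines:
--             j = 1
--             while j < len(lines) and not lines[j].startswith("### "):
--                 j += 1
--             res.append(lines[:j])
--             lines = lines[j:]
--         return res
--
--     tbl = table_md.splitlines()
--     out = []
--     for b in blocks(content.splitlines()):
--         for k, line in enumerate(b):
--             if line.strip() == heading:
--                 out.extend(b[:k])
--                 out.append(line)
--                 out.extend(tbl)
--                 out.append("")
--                 break
--         else:
--             out.extend(b)
--     return "\n".join(out).rstrip() + "\n"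
-- ===== Notes on version B (the rewrite author's own statement) =====
-- stated objective: alternative
-- what changed: B first groups the lines into sections (split before each line starting with '### '), then rewrites each section independently: a section containing a strip-matching heading keeps its prefix and heading line and gets the table plus a blank line, others are emitted verbatim; A instead does one interleaved scan-and-skip over the lines.
import Mathlib
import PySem

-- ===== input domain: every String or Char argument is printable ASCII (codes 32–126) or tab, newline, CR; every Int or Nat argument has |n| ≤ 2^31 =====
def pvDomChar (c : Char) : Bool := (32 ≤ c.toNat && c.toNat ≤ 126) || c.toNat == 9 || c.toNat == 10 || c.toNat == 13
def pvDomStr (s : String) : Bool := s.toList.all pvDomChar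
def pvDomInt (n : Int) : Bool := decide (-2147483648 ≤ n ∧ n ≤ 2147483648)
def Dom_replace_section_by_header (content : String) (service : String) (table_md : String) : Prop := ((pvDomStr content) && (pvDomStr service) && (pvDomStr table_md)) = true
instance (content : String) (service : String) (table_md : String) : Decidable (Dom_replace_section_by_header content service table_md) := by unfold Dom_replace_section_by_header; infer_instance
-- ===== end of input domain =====

-- B regroups the lines into '### '-delimited sections and rewrites each section independently
-- (alternative decomposition, same cost); A does one interleaved scan-and-skip.

-- shared predicates: 'line.startswith("### ")' and 'line.strip() == heading'
def pvHdr (x : String) : Bool := PySem.Str.startswith x "### "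
def pvMatch (heading : String) (x : String) : Bool := PySem.Str.strip x == heading

-- ===== PORT A =====
-- A's while loop: emit line; on a strip-match emit table + "" and skip to the next '### ' line.
def pvA_loop (heading : String) (tbl : List String) : List String → List String
  | [] => []
  | l :: rest =>
    if pvMatch heading l then
      l :: (tbl ++ [""] ++ pvA_loop heading tbl (rest.dropWhile (fun x => !pvHdr x)))
    else
      l :: pvA_loop heading tbl rest
termination_by ls => ls.length
decreasing_by
  · exact Nat.lt_succ_of_le (List.length_dropWhile_le _ _)
  · simp

def replace_section_by_header (content : String) (service : String) (table_md : String) : String :=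
  PySem.Str.rstrip (PySem.Str.join "\n"
    (pvA_loop ("### Pendo." ++ service) (PySem.Str.splitlines table_md)
      (PySem.Str.splitlines content))) ++ "\n"

-- ===== PORT B =====
-- Source B's blocks(): split the line list into sections, a new section before each '### ' line.
def pvB_blocks : List String → List (List String)
  | [] => []
  | l :: rest =>
    (l :: rest.takeWhile (fun x => !pvHdr x)) :: pvB_blocks (rest.dropWhile (fun x => !pvHdr x))
termination_by ls => ls.length
decreasing_by
  exact Nat.lt_succ_of_le (List.length_dropWhile_le _ _)

-- Source B's per-section rewrite: scan to the first strip-matching line; if found, keep the prefix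
-- and the matching line, then the table and a blank line; otherwise the section verbatim.
def pvB_emit (heading : String) (tbl : List String) (b : List String) : List String :=
  match b.dropWhile (fun l => !pvMatch heading l) with
  | [] => b
  | m :: _ => b.takeWhile (fun l => !pvMatch heading l) ++ m :: (tbl ++ [""])

def replace_section_by_header_alt (content : String) (service : String) (table_md : String) : String :=
  PySem.Str.rstrip (PySem.Str.join "\n"
    ((pvB_blocks (PySem.Str.splitlines content)).flatMap
      (pvB_emit ("### Pendo." ++ service) (PySem.Str.splitlines table_md)))) ++ "\n"

-- ===== PRECONDITION & SPEC =====
def Spec_replace_section_by_header (content : String) (service : String) (table_md : String) (out : String) : Prop := out = replace_section_by_header_alt content service table_md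
instance (content : String) (service : String) (table_md : String) (out : String) : Decidable (Spec_replace_section_by_header content service table_md out) := by unfold Spec_replace_section_by_header; infer_instance

-- ===== CLAIM (what is proved, stated in full; the proofs are below) =====
def Claim_equal_replace_section_by_header : Prop := ∀ (content : String) (service : String) (table_md : String), Dom_replace_section_by_header content service table_md → Spec_replace_section_by_header content service table_md (replace_section_by_header content service table_md)

-- ===== LEMMAS AND PROOFS =====

theorem pv_dropWhile_idem {p : String → Bool} (l : List String) :
    (l.dropWhile p).dropWhile p = l.dropWhile p := by
  induction l with
  | nil => simp
  | cons x xs ih =>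
    by_cases hx : p x = true
    · simpa [hx] using ih
    · simp [List.dropWhile_cons, hx]

theorem pv_dropWhile_append_of_all {p : String → Bool} (t rs : List String)
    (ht : ∀ x ∈ t, p x = true) :
    (t ++ rs).dropWhile p = rs.dropWhile p := by
  induction t with
  | nil => simp
  | cons x xs ih =>
    simp only [List.cons_append, List.dropWhile_cons, ht x (by simp)]
    exact ih (fun y hy => ht y (by simp [hy]))

-- Inner lemma: A's loop on a header-free prefix t followed by a 'stable' tail rs
-- equals B's per-section rewrite of t followed by A's loop on rs.
theorem pv_inner (heading : String) (tbl : List String) (t rs : List String)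
    (ht : ∀ x ∈ t, (!pvHdr x) = true)
    (hrs : rs.dropWhile (fun x => !pvHdr x) = rs) :
    pvA_loop heading tbl (t ++ rs) =
      (match t.dropWhile (fun l => !pvMatch heading l) with
       | [] => t ++ pvA_loop heading tbl rs
       | m :: _ => t.takeWhile (fun l => !pvMatch heading l) ++
           m :: (tbl ++ [""]) ++ pvA_loop heading tbl rs) := by
  induction t with
  | nil => simp
  | cons x xs ih =>
    by_cases hx : pvMatch heading x = true
    · have hdrop : (xs ++ rs).dropWhile (fun x => !pvHdr x) = rs := by
        rw [pv_dropWhile_append_of_all xs rs (fun y hy => ht y (by simp [hy])), hrs]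
      rw [List.cons_append, pvA_loop, if_pos hx, hdrop]
      simp [List.dropWhile_cons, hx]
    · have hx' : pvMatch heading x = false := by simpa using hx
      have ih' := ih (fun y hy => ht y (by simp [hy]))
      rw [List.cons_append, pvA_loop, if_neg (by simp [hx']), ih']
      cases hsp : xs.dropWhile (fun l => !pvMatch heading l) with
      | nil => simp [List.takeWhile_cons, hx', hsp]
      | cons m ms => simp [List.takeWhile_cons, hx', hsp]

theorem pv_main (heading : String) (tbl : List String) :
    ∀ (n : Nat) (lines : List String), lines.length ≤ n →
      pvA_loop heading tbl lines = (pvB_blocks lines).flatMap (pvB_emit heading tbl) := by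
  intro n
  induction n with
  | zero =>
    intro lines hl
    have : lines = [] := List.eq_nil_of_length_eq_zero (Nat.le_zero.mp hl)
    simp [this, pvA_loop, pvB_blocks]
  | succ n ih =>
    intro lines hl
    match lines with
    | [] => simp [pvA_loop, pvB_blocks]
    | l :: rest =>
      have hlen : rest.length ≤ n := Nat.succ_le_succ_iff.mp hl
      have hdroplen : (rest.dropWhile (fun x => !pvHdr x)).length ≤ n :=
        le_trans (List.length_dropWhile_le _ _) hlen
      rw [pvB_blocks, List.flatMap_cons]
      by_cases hmatch : pvMatch heading l = true
      · have hemit : pvB_emit heading tbl (l :: rest.takeWhile (fun x => !pvHdr x)) =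
            l :: (tbl ++ [""]) := by
          simp [pvB_emit, List.dropWhile_cons, hmatch]
        rw [hemit, pvA_loop, if_pos hmatch, ih _ hdroplen]
        simp
      · have hmatch' : pvMatch heading l = false := by simpa using hmatch
        have hsplit : rest = rest.takeWhile (fun x => !pvHdr x) ++
            rest.dropWhile (fun x => !pvHdr x) := (List.takeWhile_append_dropWhile).symm
        have htake : ∀ x ∈ rest.takeWhile (fun x => !pvHdr x), (!pvHdr x) = true :=
          fun x hx => List.mem_takeWhile_imp (p := fun x => !pvHdr x) hx
        have hstable := pv_dropWhile_idem (p := fun x => !pvHdr x) rest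
        rw [pvA_loop, if_neg (by simp [hmatch'])]
        conv_lhs => rw [hsplit]
        rw [pv_inner heading tbl _ _ htake hstable, ih _ hdroplen]
        cases hsp : (rest.takeWhile (fun x => !pvHdr x)).dropWhile
            (fun l => !pvMatch heading l) with
        | nil => simp [pvB_emit, List.dropWhile_cons, List.takeWhile_cons, hmatch', hsp]
        | cons m ms => simp [pvB_emit, List.dropWhile_cons, List.takeWhile_cons, hmatch', hsp]

-- ===== VERDICT (by name: the statement is the Claim_ definition above) =====
theorem replace_section_by_header_spec : Claim_equal_replace_section_by_header := by
  intro content service table_md _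
  unfold Spec_replace_section_by_header replace_section_by_header replace_section_by_header_alt
  rw [pv_main ("### Pendo." ++ service) (PySem.Str.splitlines table_md)
    (PySem.Str.splitlines content).length (PySem.Str.splitlines content) le_rfl]
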